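-- pv_equiv track=rewrite | github.com/sherryxiata/zcyNowcoder | practice/MaxLetter.py | maxC
-- ===== SOURCE A (Python) =====
-- def maxC(str):
--     if not str: return None
--     ma = str[0]
--     for c in str:
--         if c > ma: ma = c
--     arr = []
--     for c in str:
--         arr.append(c)
--         if c == ma: arr.append('(max)')
--     return ''.join(arr)
-- ===== SOURCE B (Python) =====
-- def maxC(str):
--     if not str:
--         return None
--     m = None
--     ann_rev = []
--     plain_rev = []
--     for c in reversed(str):
--         if m is None or c > m:
--             m = c
--             ann_rev = plain_rev.copy()
--             ann_rev.append('(max)')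
--         elif c == m:
--             ann_rev.append('(max)')
--         ann_rev.append(c)
--         plain_rev.append(c)
--     return ''.join(reversed(ann_rev))
-- ===== Notes on version B (the rewrite author's own statement) =====
-- stated objective: alternative
-- what changed: Single backward pass that maintains the running suffix maximum together with both the annotated and plain renderings of the suffix, rebuilding the annotation from the plain pieces whenever a larger character appears, instead of A's two sequential forward loops (max pass, then annotate pass).
import Mathlib
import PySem

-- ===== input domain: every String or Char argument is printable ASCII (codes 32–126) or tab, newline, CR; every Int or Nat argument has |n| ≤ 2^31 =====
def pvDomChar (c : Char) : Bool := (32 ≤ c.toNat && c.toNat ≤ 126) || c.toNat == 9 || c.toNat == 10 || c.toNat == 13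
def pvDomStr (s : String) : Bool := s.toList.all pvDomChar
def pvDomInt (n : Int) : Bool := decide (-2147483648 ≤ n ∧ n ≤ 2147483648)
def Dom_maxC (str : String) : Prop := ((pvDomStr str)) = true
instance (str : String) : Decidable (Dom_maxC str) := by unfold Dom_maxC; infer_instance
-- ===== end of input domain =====

-- B replaces A's two forward loops (max pass, then annotate pass) by ONE backward pass that
-- carries the running suffix maximum together with the annotated and plain piece lists,
-- rebuilding the annotation from the plain pieces when a larger character appears. Same cost class.

-- ===== PORT A =====
def maxC (str : String) : Option String :=
  match str.toList with
  | [] => none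
  | c0 :: _ =>
    let ma := str.toList.foldl (fun ma c => if ma < c then c else ma) c0
    let arr := str.toList.foldl (fun arr c =>
      let arr := arr ++ [String.ofList [c]]
      if c == ma then arr ++ ["(max)"] else arr) ([] : List String)
    some (PySem.Str.join "" arr)

-- ===== PORT B =====
-- one step of Source B's backward loop: state = (m, ann_rev, plain_rev)
def stepB (st : Option Char × List String × List String) (c : Char) :
    Option Char × List String × List String :=
  let (m, annRev) :=
    match st.1 with
    | none => (some c, st.2.2 ++ ["(max)"])                    -- m is None: copy plain, append marker
    | some mc =>
      if mc < c then (some c, st.2.2 ++ ["(max)"])             -- c > m: rebuild from plain, append marker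
      else if c == mc then (some mc, st.2.1 ++ ["(max)"])      -- c == m: append marker
      else (some mc, st.2.1)
  (m, annRev ++ [String.ofList [c]], st.2.2 ++ [String.ofList [c]])

def maxC_alt (str : String) : Option String :=
  if str.toList = [] then none
  else
    let st := str.toList.reverse.foldl stepB (none, [], [])
    some (PySem.Str.join "" st.2.1.reverse)

-- ===== PRECONDITION & SPEC =====
def Spec_maxC (str : String) (out : Option String) : Prop := out = maxC_alt str
instance (str : String) (out : Option String) : Decidable (Spec_maxC str out) := by unfold Spec_maxC; infer_instance

-- ===== CLAIM (what is proved, stated in full; the proofs are below) =====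
def Claim_equal_maxC : Prop := ∀ (str : String), Dom_maxC str → Spec_maxC str (maxC str)

-- ===== LEMMAS AND PROOFS =====

-- the annotation of a char list relative to a designated maximum m
def annot (m : Char) (l : List Char) : List String :=
  l.flatMap (fun c => if c = m then [String.ofList [c], "(max)"] else [String.ofList [c]])

theorem annot_cons (m c : Char) (l : List Char) :
    annot m (c :: l)
      = (if c = m then [String.ofList [c], "(max)"] else [String.ofList [c]]) ++ annot m l := by
  simp [annot]

theorem annot_no_max (m : Char) (l : List Char) (h : ∀ x ∈ l, x ≠ m) :
    annot m l = l.map (fun c => String.ofList [c]) := by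
  induction l with
  | nil => simp [annot]
  | cons c t ih =>
    rw [annot_cons, if_neg (h c (by simp)), ih (fun x hx => h x (by simp [hx]))]
    simp

theorem if_lt_eq_max (a b : Char) : (if a < b then b else a) = max a b := by
  rcases lt_or_ge a b with h | h
  · simp [h, max_eq_right h.le]
  · simp [not_lt.mpr h, max_eq_left h]

theorem foldl_if_lt_eq_foldl_max (t : List Char) (a : Char) :
    t.foldl (fun ma c => if ma < c then c else ma) a = t.foldl max a := by
  induction t generalizing a with
  | nil => rfl
  | cons c t ih => rw [List.foldl_cons, List.foldl_cons, if_lt_eq_max, ih]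

theorem foldl_max_comm (t : List Char) : ∀ (a b : Char),
    t.foldl max (max a b) = max a (t.foldl max b) := by
  induction t with
  | nil => intro a b; rfl
  | cons c t ih =>
    intro a b
    rw [List.foldl_cons, List.foldl_cons, max_assoc, ih]

theorem le_foldl_max_init (t : List Char) : ∀ (a : Char), a ≤ t.foldl max a := by
  induction t with
  | nil => intro a; exact le_rfl
  | cons c t ih =>
    intro a
    exact le_trans (le_max_left a c) (ih (max a c))

theorem le_foldl_max_mem (t : List Char) : ∀ (a x : Char), x ∈ t → x ≤ t.foldl max a := by
  induction t with
  | nil => intro _ _ h; simp at h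
  | cons c t ih =>
    intro a x hx
    rcases List.mem_cons.mp hx with h | h
    · subst h
      exact le_trans (le_max_right a x) (le_foldl_max_init t (max a x))
    · exact ih (max a c) x h

-- A's accumulator loop is the annotation flatMap
theorem foldl_arr (ma : Char) :
    ∀ (cs : List Char) (init : List String),
      cs.foldl (fun arr c =>
        let arr := arr ++ [String.ofList [c]]
        if c == ma then arr ++ ["(max)"] else arr) init
      = init ++ annot ma cs := by
  intro cs
  induction cs with
  | nil => intro init; simp [annot]
  | cons c t ih =>
    intro init
    have hstep : (let arr := init ++ [String.ofList [c]];
        if (c == ma) = true then arr ++ ["(max)"] else arr)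
        = init ++ (if c = ma then [String.ofList [c], "(max)"] else [String.ofList [c]]) := by
      by_cases h : c = ma <;> simp [h, List.append_assoc]
    rw [List.foldl_cons, hstep, ih, annot_cons]
    simp

-- invariant of B's backward fold: after processing the reversed suffix c :: l, the state holds
-- the suffix maximum, the reversed annotated pieces, and the reversed plain pieces
theorem invB (l : List Char) : ∀ (c : Char),
    ((c :: l).reverse).foldl stepB (none, [], [])
      = (some (l.foldl max c),
         (annot (l.foldl max c) (c :: l)).reverse,
         ((c :: l).map (fun c => String.ofList [c])).reverse) := by
  induction l with
  | nil =>
    intro c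
    simp [stepB, annot]
  | cons c' t ih =>
    intro c
    have hrev : ((c :: c' :: t).reverse) = ((c' :: t).reverse) ++ [c] := by simp
    rw [hrev, List.foldl_append, ih c']
    have hM : (c' :: t).foldl max c = max c (t.foldl max c') := by
      rw [List.foldl_cons, foldl_max_comm]
    set M' := t.foldl max c' with hM'
    by_cases hlt : M' < c
    · -- c is a new, strictly larger maximum: rebuild annotation from plain pieces
      have hmax : (c' :: t).foldl max c = c := by rw [hM]; exact max_eq_left hlt.le
      have hne : ∀ x ∈ c' :: t, x ≠ c := by
        intro x hx
        rcases List.mem_cons.mp hx with h | h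
        · subst h; exact ne_of_lt (lt_of_le_of_lt (le_foldl_max_init t x) hlt)
        · exact ne_of_lt (lt_of_le_of_lt (le_foldl_max_mem t c' x h) hlt)
      rw [hmax, List.foldl_cons, List.foldl_nil]
      simp [stepB, hlt, annot_cons, annot_no_max c (c' :: t) hne]
    · have hmax : (c' :: t).foldl max c = M' := by
        rw [hM]; exact max_eq_right (not_lt.mp hlt)
      rw [hmax, List.foldl_cons, List.foldl_nil]
      by_cases heq : c = M'
      · simp [stepB, heq, annot_cons]
      · simp [stepB, hlt, heq, annot_cons]

-- ===== VERDICT (by name: the statement is the Claim_ definition above) =====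
theorem maxC_spec : Claim_equal_maxC := by
  intro str _
  unfold Spec_maxC maxC maxC_alt
  cases hs : str.toList with
  | nil => simp
  | cons c0 t =>
    rw [if_neg (by simp)]
    simp only []
    rw [invB t c0]
    have hma : (c0 :: t).foldl (fun ma c => if ma < c then c else ma) c0 = t.foldl max c0 := by
      rw [foldl_if_lt_eq_foldl_max, List.foldl_cons, max_self]
    rw [hma, foldl_arr]
    simp
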